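-- pv_equiv track=rewrite | github.com/Heeheedaa/DNDC-NSGA-III | libfun_Yulin.py | find_path_dictionary
-- ===== SOURCE A (Python) =====
-- def find_path_dictionary(fun_2_eval, dic):
--     """find the path in the dictionary for each key of the input list
--     :fun_2_eval: list of string with the variables to evaluate
--     :fun_2_eval:  ListType
--     :dic: dictionary
--     :type dic:  DictType
--     :returns: for each variables the path in the dictionary
--     >>> dic = {'a1': {'b1': 1, 'b2': 2, 'b3': 3}, 'a2': {'b4': {'c4': 4, 'c5': 5}}}
--     >>> find_path_dictionary(['c4', 'b2'], dic)
--     {'b2': ['a1', 'b2'], 'c4': ['a2', 'b4', 'c4']}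
--     """
--
--     # TODO: error if fun is not in the dictionary
--
--     path = {}
--     for fun in fun_2_eval:
--         for k in dic.keys():
--             for i in dic[k].keys():
--                 if isinstance(dic[k][i], dict):
--                     for j in dic[k][i].keys():
--                         if fun in j:
--                             path[fun] = [k, i, j]
--                 elif fun in i:
--                     path[fun] = [k, i]
--
--                     print (path)
--     return path
-- ===== SOURCE B (Python) =====
-- def find_path_dictionary(fun_2_eval, dic):
--     """Same result as A on nested (three-level) dictionaries: flatten the
--     dictionary once into an ordered list of (leaf-name, path) records, then
--     for each variable scan that list backwards and keep the first hit
--     (= A's last-match-wins)."""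
--     flat = [(j, [k, i, j])
--             for k in dic
--             for i in dic[k]
--             for j in dic[k][i]]
--     path = {}
--     for fun in fun_2_eval:
--         for name, p in reversed(flat):
--             if fun in name:
--                 path[fun] = p
--                 break
--     return path
-- ===== Notes on version B (the rewrite author's own statement) =====
-- stated objective: faster
-- what changed: B flattens the nested dictionary once into an ordered (leaf-name, path) list and, per variable, scans it backwards stopping at the first substring hit, instead of A's full nested re-traversal per variable with last-match-wins overwriting.
import Mathlib
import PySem

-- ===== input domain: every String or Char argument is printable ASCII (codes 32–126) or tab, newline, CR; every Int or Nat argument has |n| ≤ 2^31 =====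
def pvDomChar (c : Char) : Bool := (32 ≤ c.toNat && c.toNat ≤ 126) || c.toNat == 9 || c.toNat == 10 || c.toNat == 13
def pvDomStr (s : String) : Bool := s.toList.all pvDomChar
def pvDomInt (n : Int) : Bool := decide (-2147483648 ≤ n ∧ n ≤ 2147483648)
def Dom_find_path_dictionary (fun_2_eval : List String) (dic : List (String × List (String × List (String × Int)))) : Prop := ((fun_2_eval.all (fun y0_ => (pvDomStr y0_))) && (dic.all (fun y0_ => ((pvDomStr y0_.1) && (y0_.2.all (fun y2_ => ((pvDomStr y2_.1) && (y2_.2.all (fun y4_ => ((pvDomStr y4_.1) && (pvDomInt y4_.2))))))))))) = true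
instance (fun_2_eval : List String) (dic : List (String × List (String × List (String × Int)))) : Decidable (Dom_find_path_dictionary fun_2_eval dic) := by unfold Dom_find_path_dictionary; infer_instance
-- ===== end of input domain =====

-- B flattens the dictionary once into an ordered (leaf-name, path) list and, per variable,
-- takes the first substring hit scanning backwards, instead of A's nested re-traversal per
-- variable with last-match-wins overwriting (objective: alternative decomposition).
-- Under this task's type every dic[k][i] is a (three-level) dictionary, so A's isinstance
-- branch is always taken and its elif branch (and its print side effect) is unreachable.

-- ===== PORT A =====
-- literal transliteration of A's nested loops; path is a Python dict (PySem.Dict),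
-- returned as its items (association list in insertion order)
def find_path_dictionary (fun_2_eval : List String) (dic : List (String × List (String × List (String × Int)))) : List (String × List String) :=
  (fun_2_eval.foldl (fun path fn =>
    dic.foldl (fun path kp =>
      kp.2.foldl (fun path ip =>
        -- dic[k][i] is always a dict here (isinstance(dic[k][i], dict) is True)
        ip.2.foldl (fun path jp =>
          if PySem.Str.isIn fn jp.1 then path.insert fn [kp.1, ip.1, jp.1] else path)
          path)
        path)
      path)
    PySem.Dict.empty).items

-- ===== PORT B =====
-- the flattened index: one ordered (leaf-name, full-path) record per leaf
def fpd_flat (dic : List (String × List (String × List (String × Int)))) : List (String × List String) :=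
  dic.flatMap (fun kp => kp.2.flatMap (fun ip => ip.2.map (fun jp => (jp.1, [kp.1, ip.1, jp.1]))))

def find_path_dictionary_alt (fun_2_eval : List String) (dic : List (String × List (String × List (String × Int)))) : List (String × List String) :=
  let flat := fpd_flat dic
  (fun_2_eval.foldl (fun path fn =>
    match flat.reverse.find? (fun r => PySem.Str.isIn fn r.1) with
    | some r => path.insert fn r.2
    | none => path) PySem.Dict.empty).items

-- ===== PRECONDITION & SPEC =====
def Spec_find_path_dictionary (fun_2_eval : List String) (dic : List (String × List (String × List (String × Int)))) (out : List (String × List String)) : Prop := out = find_path_dictionary_alt fun_2_eval dic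
instance (fun_2_eval : List String) (dic : List (String × List (String × List (String × Int)))) (out : List (String × List String)) : Decidable (Spec_find_path_dictionary fun_2_eval dic out) := by unfold Spec_find_path_dictionary; infer_instance

-- ===== CLAIM (what is proved, stated in full; the proofs are below) =====
def Claim_equal_find_path_dictionary : Prop := ∀ (fun_2_eval : List String) (dic : List (String × List (String × List (String × Int)))), Dom_find_path_dictionary fun_2_eval dic → Spec_find_path_dictionary fun_2_eval dic (find_path_dictionary fun_2_eval dic)

-- ===== LEMMAS AND PROOFS =====

-- the last-match-wins fold over any record list equals the reverse-scan first match
theorem fpd_fold_eq_revfind (fn : String) (l : List (String × List String))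
    (d : PySem.Dict String (List String)) :
    l.foldl (fun d r => if PySem.Str.isIn fn r.1 then d.insert fn r.2 else d) d
      = (match l.reverse.find? (fun r => PySem.Str.isIn fn r.1) with
         | some r => d.insert fn r.2
         | none => d) := by
  induction l using List.reverseRecOn with
  | nil => simp
  | append_singleton l' x ih =>
    rw [List.foldl_append, List.reverse_append]
    simp only [List.foldl_cons, List.foldl_nil, List.reverse_singleton, List.singleton_append,
      List.find?_cons]
    by_cases hx : PySem.Str.isIn fn x.1
    · simp only [hx, if_pos, ih]
      cases h : l'.reverse.find? (fun r => PySem.Str.isIn fn r.1) with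
      | none => simp
      | some r => simp [PySem.Dict.insert_insert_self]
    · simp only [hx, ih]
      simp

-- A's per-variable nested traversal is the fold over the flattened record list
theorem fpd_nested_eq_flat (fn : String) (dic : List (String × List (String × List (String × Int))))
    (d : PySem.Dict String (List String)) :
    dic.foldl (fun path kp =>
      kp.2.foldl (fun path ip =>
        ip.2.foldl (fun path jp =>
          if PySem.Str.isIn fn jp.1 then path.insert fn [kp.1, ip.1, jp.1] else path)
          path)
        path)
      d
      = (fpd_flat dic).foldl
          (fun d r => if PySem.Str.isIn fn r.1 then d.insert fn r.2 else d) d := by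
  unfold fpd_flat
  rw [List.foldl_flatMap]
  refine (PySem.List.foldl_congr_mem _ _ _ _ ?_).symm
  intro acc kp _
  rw [List.foldl_flatMap]
  refine (PySem.List.foldl_congr_mem _ _ _ _ ?_).symm
  intro acc' ip _
  rw [List.foldl_map]

-- ===== VERDICT (by name: the statement is the Claim_ definition above) =====
theorem find_path_dictionary_spec : Claim_equal_find_path_dictionary := by
  intro fun_2_eval dic _
  unfold Spec_find_path_dictionary find_path_dictionary find_path_dictionary_alt
  congr 1
  refine PySem.List.foldl_congr_mem _ _ _ _ ?_
  intro path fn hfn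
  rw [fpd_nested_eq_flat, fpd_fold_eq_revfind]
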